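-- pv_equiv track=rewrite | github.com/raafay-s/CS-303E | RecursiveFunctions.py | findLastUppercase
-- ===== SOURCE A (Python) =====
-- def findLastUppercase(s):
--     """ Return the last uppercase letter in string s, if any. """
--     if not s:
--         return None
--     result = findLastUppercase(s[:-1])
--     if s[-1].isupper():
--         return s[-1]
--     else:
--         return result
-- ===== SOURCE B (Python) =====
-- def findLastUppercase(s):
--     """ Return the last uppercase letter in string s, if any. """
--     result = None
--     for c in s:
--         if c.isupper():
--             result = c
--     return result
-- ===== Notes on version B (the rewrite author's own statement) =====
-- stated objective: simpler
-- what changed: Replaced A's O(n^2) recursion over s[:-1] (which copies a prefix slice at every level) with a single iterative forward scan keeping the last uppercase letter seen in an accumulator.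
import Mathlib
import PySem

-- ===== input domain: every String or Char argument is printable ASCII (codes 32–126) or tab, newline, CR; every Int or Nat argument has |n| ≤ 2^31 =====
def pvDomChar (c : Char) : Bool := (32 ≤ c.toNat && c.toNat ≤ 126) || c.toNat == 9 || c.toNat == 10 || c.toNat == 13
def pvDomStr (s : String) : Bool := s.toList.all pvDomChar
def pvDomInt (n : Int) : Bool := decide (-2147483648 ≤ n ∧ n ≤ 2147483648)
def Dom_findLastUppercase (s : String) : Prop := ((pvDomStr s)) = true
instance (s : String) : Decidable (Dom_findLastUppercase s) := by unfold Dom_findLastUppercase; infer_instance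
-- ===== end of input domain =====

-- B replaces A's recursion over s[:-1] with one iterative forward scan keeping the last uppercase letter seen (simpler, linear).

-- ===== PORT A =====
-- s[:-1] on a nonempty string is dropLast; s[-1] is getLast (exact here since the string is nonempty).
def findLastUppercaseGoA (l : List Char) : Option String :=
  if h : l = [] then none
  else
    let result := findLastUppercaseGoA l.dropLast
    if PySem.Chars.isupper (l.getLast h) then some (String.mk [l.getLast h])
    else result
termination_by l.length
decreasing_by
  have : l.length ≠ 0 := by simpa using h
  simp [List.length_dropLast]; omega

def findLastUppercase (s : String) : Option String :=
  findLastUppercaseGoA s.toList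

-- ===== PORT B =====
def findLastUppercase_alt (s : String) : Option String :=
  s.toList.foldl (fun result c => if PySem.Chars.isupper c then some (String.mk [c]) else result) none

-- ===== PRECONDITION & SPEC =====
def Spec_findLastUppercase (s : String) (out : Option String) : Prop := out = findLastUppercase_alt s
instance (s : String) (out : Option String) : Decidable (Spec_findLastUppercase s out) := by unfold Spec_findLastUppercase; infer_instance

-- ===== CLAIM (what is proved, stated in full; the proofs are below) =====
def Claim_equal_findLastUppercase : Prop := ∀ (s : String), Dom_findLastUppercase s → Spec_findLastUppercase s (findLastUppercase s)

-- ===== LEMMAS AND PROOFS =====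
theorem findLastUppercaseGoA_nil : findLastUppercaseGoA [] = none := by
  simp [findLastUppercaseGoA]

theorem findLastUppercaseGoA_concat (l : List Char) (c : Char) :
    findLastUppercaseGoA (l ++ [c]) =
      if PySem.Chars.isupper c then some (String.mk [c]) else findLastUppercaseGoA l := by
  rw [findLastUppercaseGoA]
  simp

theorem goA_eq_foldl (l : List Char) :
    findLastUppercaseGoA l =
      l.foldl (fun result c => if PySem.Chars.isupper c then some (String.mk [c]) else result) none := by
  induction l using List.reverseRecOn with
  | nil => simp [findLastUppercaseGoA_nil]
  | append_singleton l c ih =>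
      rw [findLastUppercaseGoA_concat, ih, List.foldl_append]
      simp

-- ===== VERDICT (by name: the statement is the Claim_ definition above) =====
theorem findLastUppercase_spec : Claim_equal_findLastUppercase := by
  intro s _
  unfold Spec_findLastUppercase findLastUppercase findLastUppercase_alt
  exact goA_eq_foldl s.toList
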